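-- pv_equiv track=rewrite | github.com/MolfarUA/CodeWars_Solutions | 2 kyu/Power tower modulo m/solution.py | tow
-- ===== SOURCE A (Python) =====
-- def tow(base, h, mi):
--     if base ==1 or h==0: return 1
--     if h==1: return base
--     if base>mi:return -1
--     exp=tow(base,h-1,mi)
--     if exp>mi or exp==-1:
--         return -1
--     return pow(base,exp)
-- ===== SOURCE B (Python) =====
-- def tow(base, h, mi):
--     if base == 1 or h == 0:
--         return 1
--     if h == 1:
--         return base
--     if base > mi:
--         return -1
--     current = base
--     for _ in range(h - 1):
--         if current > mi or current == -1:
--             return -1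
--         current = pow(base, current)
--     return current
-- ===== Notes on version B (the rewrite author's own statement) =====
-- stated objective: simpler
-- what changed: The depth-h recursion with a -1 sentinel threaded back up is replaced by a bottom-up loop that keeps one accumulator and short-circuits with an early return, removing the recursion entirely.
-- outside the precondition, e.g. on tow(-2, 2, 100): A returns 0.25, B returns 0.25; on tow(2, -1, 5): A raises RecursionError, B returns 2
import Mathlib
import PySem

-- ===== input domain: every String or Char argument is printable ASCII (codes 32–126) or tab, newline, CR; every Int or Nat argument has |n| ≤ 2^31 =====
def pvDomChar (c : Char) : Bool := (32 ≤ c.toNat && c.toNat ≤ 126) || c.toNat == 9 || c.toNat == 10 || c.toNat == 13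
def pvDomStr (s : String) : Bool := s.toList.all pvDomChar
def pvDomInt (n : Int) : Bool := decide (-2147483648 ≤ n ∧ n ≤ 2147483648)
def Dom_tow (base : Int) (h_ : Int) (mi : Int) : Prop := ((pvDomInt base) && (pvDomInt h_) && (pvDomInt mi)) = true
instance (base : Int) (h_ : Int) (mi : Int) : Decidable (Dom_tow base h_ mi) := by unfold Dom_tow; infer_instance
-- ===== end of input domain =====

-- B replaces A's depth-h recursion (with its -1 sentinel threaded back up) by a
-- bottom-up loop over one accumulator with an early -1 return; objective: simpler.

-- ===== PORT A =====
-- A recurses on h; the recursion is driven by a fuel set to h_.toNat, which is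
-- enough whenever h_ >= 0 (the fuel-out -1 is unreachable inside Pre_; for h_ < 0
-- Python recurses forever unless a pre-recursion guard answers first, and Pre_
-- admits exactly those guarded inputs).  pow(base, exp) is ported as
-- base ^ exp.toNat: Pre_ excludes the inputs on which exp goes negative
-- (Python would leave the integers there, returning a float/complex).
def towFuel (base : Int) (mi : Int) (fuel : Nat) (h : Int) : Int :=
  if base = 1 ∨ h = 0 then 1
  else if h = 1 then base
  else if base > mi then -1
  else match fuel with
    | 0 => -1
    | n + 1 =>
      let exp := towFuel base mi n (h - 1)
      if exp > mi ∨ exp = -1 then -1 else base ^ exp.toNat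

def tow (base : Int) (h_ : Int) (mi : Int) : Int := towFuel base mi h_.toNat h_

-- ===== PORT B =====
-- the `for _ in range(h-1)` loop of Source B, with the early `return -1`
def towLoop (base : Int) (mi : Int) : Nat → Int → Int
  | 0, current => current
  | n + 1, current =>
      if current > mi ∨ current = -1 then -1
      else towLoop base mi n (base ^ current.toNat)

def tow_alt (base : Int) (h_ : Int) (mi : Int) : Int :=
  if base = 1 ∨ h_ = 0 then 1
  else if h_ = 1 then base
  else if base > mi then -1
  else towLoop base mi (h_ - 1).toNat base

-- ===== PRECONDITION & SPEC =====
-- Pre_ excludes (i) h < 0 with base ≠ 1 and base ≤ mi, where A's recursion never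
-- terminates (RecursionError), and (ii) base ≤ -2 with h ≥ 2 and base ≤ mi, where
-- A reaches pow with a negative exponent and returns a float/complex, not an int.
def Pre_tow (base : Int) (h_ : Int) (mi : Int) : Prop :=
  (0 ≤ h_ ∨ base = 1 ∨ mi < base) ∧ (-1 ≤ base ∨ h_ ≤ 1 ∨ mi < base)
instance (base : Int) (h_ : Int) (mi : Int) : Decidable (Pre_tow base h_ mi) := by
  unfold Pre_tow; infer_instance

def pvWitness_tow : Int × Int × Int := (2, 3, 10)

def Spec_tow (base : Int) (h_ : Int) (mi : Int) (out : Int) : Prop := out = tow_alt base h_ mi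
instance (base : Int) (h_ : Int) (mi : Int) (out : Int) : Decidable (Spec_tow base h_ mi out) := by
  unfold Spec_tow; infer_instance

-- ===== CLAIM (what is proved, stated in full; the proofs are below) =====
def Claim_equal_tow : Prop := ∀ (base : Int) (h_ : Int) (mi : Int),
  Dom_tow base h_ mi → Pre_tow base h_ mi → Spec_tow base h_ mi (tow base h_ mi)

-- ===== LEMMAS AND PROOFS =====

-- one step of the tower recurrence, with A's guard
def pvF (base : Int) (mi : Int) (e : Int) : Int :=
  if e > mi ∨ e = -1 then -1 else base ^ e.toNat

theorem towLoop_neg1 (base mi : Int) (n : Nat) : towLoop base mi n (-1) = -1 := by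
  cases n <;> simp [towLoop]

theorem towLoop_succ (base mi : Int) (n : Nat) (c : Int) :
    towLoop base mi (n + 1) c = towLoop base mi n (pvF base mi c) := by
  by_cases hg : c > mi ∨ c = -1
  · simp [towLoop, pvF, hg, towLoop_neg1]
  · simp [towLoop, pvF, hg]

theorem towLoop_eq_iterate (base mi : Int) (n : Nat) (c : Int) :
    towLoop base mi n c = (pvF base mi)^[n] c := by
  induction n generalizing c with
  | zero => simp [towLoop]
  | succ n ih => rw [towLoop_succ, ih, Function.iterate_succ_apply]

theorem towFuel_eq_iterate (base mi : Int) (hb : base ≠ 1) (hm : ¬ base > mi) :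
    ∀ (n : Nat) (h : Int), h = (n : Int) + 1 →
      towFuel base mi (n + 1) h = (pvF base mi)^[n] base := by
  intro n
  induction n with
  | zero =>
      intro h hh
      have : h = 1 := by omega
      subst this
      simp [towFuel, hb]
  | succ n ih =>
      intro h hh
      rw [towFuel.eq_def]
      have h0 : ¬ (base = 1 ∨ h = 0) := by push_neg; exact ⟨hb, by omega⟩
      have h1 : ¬ (h = 1) := by omega
      rw [if_neg h0, if_neg h1, if_neg hm]
      change (if towFuel base mi (n + 1) (h - 1) > mi ∨ towFuel base mi (n + 1) (h - 1) = -1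
          then -1 else base ^ (towFuel base mi (n + 1) (h - 1)).toNat) = _
      rw [ih (h - 1) (by omega), Function.iterate_succ_apply', pvF]

-- ===== VERDICT (by name: the statement is the Claim_ definition above) =====
theorem tow_spec : Claim_equal_tow := by
  intro base h_ mi _ hpre
  unfold Spec_tow tow tow_alt
  by_cases hb : base = 1 ∨ h_ = 0
  · rw [towFuel.eq_def, if_pos hb, if_pos hb]
  · rw [if_neg hb]
    push_neg at hb
    obtain ⟨hb1, hh0⟩ := hb
    by_cases hh1 : h_ = 1
    · rw [towFuel.eq_def, if_neg (by push_neg; exact ⟨hb1, hh0⟩), if_pos hh1, if_pos hh1]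
    · rw [if_neg hh1]
      by_cases hm : base > mi
      · rw [towFuel.eq_def, if_neg (by push_neg; exact ⟨hb1, hh0⟩), if_neg hh1,
          if_pos hm, if_pos hm]
      · rw [if_neg hm]
        have hge : 0 ≤ h_ := by
          rcases hpre.1 with h | h | h
          · exact h
          · exact absurd h hb1
          · exact absurd h hm
        obtain ⟨m, hmeq⟩ : ∃ m : Nat, h_ = (m : Int) + 1 :=
          ⟨(h_ - 1).toNat, by omega⟩
        subst hmeq
        have hfuel : ((m : Int) + 1).toNat = m + 1 := by omega
        have hsub : ((m : Int) + 1 - 1).toNat = m := by omega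
        rw [hfuel, hsub, towFuel_eq_iterate base mi hb1 hm m _ rfl, towLoop_eq_iterate]
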